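-- pv_equiv track=rewrite | github.com/WiuYuan/pmcad | src/pmcad/db_change.py | match_llm_output_to_hit
-- ===== SOURCE A (Python) =====
-- def _normalize(s: str) -> str:
--     return str(s).strip().lower().replace('"', "").replace("'", "")
--
-- def match_llm_output_to_hit(llm_output: str, hits: list):
--     out = _normalize(llm_output)
--     if out == "none":
--         return None
--
--     # 先按 id
--     for h in hits:
--         hid = h.get("id")
--         if hid and _normalize(hid) == out:
--             return h
--
--     # 再按 name 兜底
--     for h in hits:
--         nm = h.get("name")
--         if nm and _normalize(nm) == out:
--             return h
--
--     return None
-- ===== SOURCE B (Python) =====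
-- def _norm(s):
--     return str(s).strip().lower().replace('"', "").replace("'", "")
--
-- def _ok(v, out):
--     return bool(v) and _norm(v) == out
--
-- def match_llm_output_to_hit(llm_output, hits):
--     out = _norm(llm_output)
--     if out == "none":
--         return None
--     cands = [((0 if _ok(h.get("id"), out) else 1, i), h)
--              for i, h in enumerate(hits)
--              if _ok(h.get("id"), out) or _ok(h.get("name"), out)]
--     if not cands:
--         return None
--     return min(cands, key=lambda c: c[0])[1]
-- ===== Notes on version B (the rewrite author's own statement) =====
-- stated objective: alternative
-- what changed: Replaces A's two sequential scans over hits (id pass, then name pass) with a single enumerate pass that builds a ranked candidate list ((0 for id match, 1 for name match), index) and returns the hit with the lexicographically least (rank, index) key.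
import Mathlib
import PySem

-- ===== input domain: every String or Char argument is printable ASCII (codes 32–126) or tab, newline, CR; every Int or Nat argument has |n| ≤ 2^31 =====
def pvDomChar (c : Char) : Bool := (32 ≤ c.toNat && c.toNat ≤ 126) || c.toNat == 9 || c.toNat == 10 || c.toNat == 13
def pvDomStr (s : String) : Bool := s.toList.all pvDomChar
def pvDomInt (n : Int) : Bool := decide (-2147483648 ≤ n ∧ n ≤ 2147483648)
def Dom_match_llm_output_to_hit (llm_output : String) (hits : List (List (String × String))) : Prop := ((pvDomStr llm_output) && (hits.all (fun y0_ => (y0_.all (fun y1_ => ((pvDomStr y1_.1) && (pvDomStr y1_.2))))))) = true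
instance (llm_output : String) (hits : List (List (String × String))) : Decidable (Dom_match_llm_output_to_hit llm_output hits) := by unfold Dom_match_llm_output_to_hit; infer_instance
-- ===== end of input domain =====

-- B replaces A's two sequential scans (id pass, then name pass) with a different algorithm:
-- one enumerate pass building a ranked candidate list and a lexicographic-minimum selection
-- over (rank, index) keys (objective: alternative/simpler decomposition).

-- shared helper: _normalize
def pvNorm (s : String) : String :=
  PySem.Str.replace (PySem.Str.replace (PySem.Str.lower (PySem.Str.strip s)) "\"" "") "'" ""

-- ===== PORT A =====
-- dict .get (first-match lookup) and the truthiness test 'v and _normalize(v) == out'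
def pvGet (h : List (String × String)) (k : String) : Option String :=
  (PySem.Dict.mk h).get? k

def pvHitMatch (out : String) (v? : Option String) : Bool :=
  v?.any (fun v => v != "" && pvNorm v == out)

def pvIdLoop (out : String) : List (List (String × String)) → Option (List (String × String))
  | [] => none
  | h :: t => if pvHitMatch out (pvGet h "id") then some h else pvIdLoop out t

def pvNameLoop (out : String) : List (List (String × String)) → Option (List (String × String))
  | [] => none
  | h :: t => if pvHitMatch out (pvGet h "name") then some h else pvNameLoop out t

def match_llm_output_to_hit (llm_output : String) (hits : List (List (String × String))) : Option (List (String × String)) :=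
  let out := pvNorm llm_output
  if out = "none" then none
  else
    match pvIdLoop out hits with
    | some h => some h
    | none => pvNameLoop out hits

-- ===== PORT B =====
-- Source B's _ok(h.get(k), out)
def pvOk (out : String) (h : List (String × String)) (k : String) : Bool :=
  match (PySem.Dict.mk h).get? k with
  | none => false
  | some v => if v = "" then false else decide (pvNorm v = out)

-- the candidate comprehension '[( (0 if id-ok else 1, i), h) for i, h in enumerate(hits) if id-ok or name-ok]'
def pvCands (out : String) (i : Nat) : List (List (String × String)) → List ((Nat × Nat) × List (String × String))
  | [] => []
  | h :: t =>
    if pvOk out h "id" || pvOk out h "name" then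
      ((if pvOk out h "id" then 0 else 1, i), h) :: pvCands out (i + 1) t
    else pvCands out (i + 1) t

-- 'min(cands, key=lambda c: c[0])' — first element with lexicographically least key
def pvMinCand (m : (Nat × Nat) × List (String × String)) :
    List ((Nat × Nat) × List (String × String)) → (Nat × Nat) × List (String × String)
  | [] => m
  | c :: t =>
      pvMinCand (if c.1.1 < m.1.1 ∨ (c.1.1 = m.1.1 ∧ c.1.2 < m.1.2) then c else m) t

def match_llm_output_to_hit_alt (llm_output : String) (hits : List (List (String × String))) : Option (List (String × String)) :=
  let out := pvNorm llm_output
  if out = "none" then none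
  else
    match pvCands out 0 hits with
    | [] => none
    | c :: cs => some ((pvMinCand c cs).2)

-- ===== PRECONDITION & SPEC =====
def Spec_match_llm_output_to_hit (llm_output : String) (hits : List (List (String × String))) (out : Option (List (String × String))) : Prop := out = match_llm_output_to_hit_alt llm_output hits
instance (llm_output : String) (hits : List (List (String × String))) (out : Option (List (String × String))) : Decidable (Spec_match_llm_output_to_hit llm_output hits out) := by unfold Spec_match_llm_output_to_hit; infer_instance

-- ===== CLAIM (what is proved, stated in full; the proofs are below) =====
def Claim_equal_match_llm_output_to_hit : Prop := ∀ (llm_output : String) (hits : List (List (String × String))), Dom_match_llm_output_to_hit llm_output hits → Spec_match_llm_output_to_hit llm_output hits (match_llm_output_to_hit llm_output hits)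

-- ===== LEMMAS AND PROOFS =====

-- B's _ok test agrees with A's truthiness test
theorem pvOk_eq (out : String) (h : List (String × String)) (k : String) :
    pvOk out h k = pvHitMatch out (pvGet h k) := by
  unfold pvOk pvHitMatch pvGet
  cases (PySem.Dict.mk h).get? k with
  | none => simp
  | some v =>
    by_cases hv : v = "" <;> simp [hv, beq_eq_decide]

-- every candidate produced from start index n has index ≥ n
theorem pvCands_idx_ge (out : String) (t : List (List (String × String))) (n : Nat) :
    ∀ c ∈ pvCands out n t, n ≤ c.1.2 := by
  induction t generalizing n with
  | nil => simp [pvCands]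
  | cons h t ih =>
    intro c hc
    unfold pvCands at hc
    split at hc
    · rcases List.mem_cons.mp hc with rfl | hc
      · simp
      · exact Nat.le_of_succ_le (ih (n + 1) c hc)
    · exact Nat.le_of_succ_le (ih (n + 1) c hc)

-- a rank-0 candidate with index below all others stays the minimum
theorem pvMinCand_rank0 (m : (Nat × Nat) × List (String × String))
    (cs : List ((Nat × Nat) × List (String × String)))
    (h0 : m.1.1 = 0) (hlt : ∀ c ∈ cs, m.1.2 < c.1.2) :
    pvMinCand m cs = m := by
  induction cs with
  | nil => rfl
  | cons c cs ih =>
    have h1 : ¬ (c.1.1 < m.1.1 ∨ (c.1.1 = m.1.1 ∧ c.1.2 < m.1.2)) := by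
      have := hlt c (List.mem_cons_self ..)
      omega
    unfold pvMinCand
    rw [if_neg h1]
    exact ih (fun c hc => hlt c (List.mem_cons_of_mem _ hc))

-- with a rank-1 accumulator of smaller index, the minimum's hit is the first id match, else the accumulator's hit
-- the three shapes of one comprehension step
theorem pvCands_cons_id (out : String) (h : List (String × String))
    (t : List (List (String × String))) (n : Nat) (cid : pvOk out h "id" = true) :
    pvCands out n (h :: t) = ((0, n), h) :: pvCands out (n + 1) t := by
  simp [pvCands, cid]

theorem pvCands_cons_name (out : String) (h : List (String × String))
    (t : List (List (String × String))) (n : Nat)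
    (cid : pvOk out h "id" = false) (cnm : pvOk out h "name" = true) :
    pvCands out n (h :: t) = ((1, n), h) :: pvCands out (n + 1) t := by
  simp [pvCands, cid, cnm]

theorem pvCands_cons_skip (out : String) (h : List (String × String))
    (t : List (List (String × String))) (n : Nat)
    (cid : pvOk out h "id" = false) (cnm : pvOk out h "name" = false) :
    pvCands out n (h :: t) = pvCands out (n + 1) t := by
  simp [pvCands, cid, cnm]

-- with a rank-1 accumulator of smaller index, the minimum's hit is the first id match, else the accumulator's hit
theorem pvMinCand_rank1 (out : String) (t : List (List (String × String)))
    (n : Nat) (m : (Nat × Nat) × List (String × String))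
    (h1 : m.1.1 = 1) (hn : m.1.2 < n) :
    (pvMinCand m (pvCands out n t)).2 =
      match pvIdLoop out t with
      | some h => h
      | none => m.2 := by
  induction t generalizing n m with
  | nil => simp [pvCands, pvMinCand, pvIdLoop]
  | cons h t ih =>
    by_cases cid : pvHitMatch out (pvGet h "id") = true
    · have cid' : pvOk out h "id" = true := by rw [pvOk_eq]; exact cid
      rw [pvCands_cons_id out h t n cid']
      unfold pvMinCand
      have hcnd : ((0, n), h).1.1 < m.1.1 ∨ (((0, n), h).1.1 = m.1.1 ∧ ((0, n), h).1.2 < m.1.2) := by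
        simp; omega
      rw [if_pos hcnd]
      rw [pvMinCand_rank0 ((0, n), h) _ rfl
        (fun c hc => Nat.lt_of_lt_of_le (Nat.lt_succ_self n) (pvCands_idx_ge out t (n + 1) c hc))]
      simp [pvIdLoop, cid]
    · have cid' : pvOk out h "id" = false := by rw [pvOk_eq]; simpa using cid
      by_cases cnm : pvOk out h "name" = true
      · rw [pvCands_cons_name out h t n cid' cnm]
        unfold pvMinCand
        have hno : ¬ (((1, n), h).1.1 < m.1.1 ∨ (((1, n), h).1.1 = m.1.1 ∧ ((1, n), h).1.2 < m.1.2)) := by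
          simp; omega
        rw [if_neg hno]
        rw [ih (n + 1) m h1 (Nat.lt_succ_of_lt hn)]
        simp [pvIdLoop, cid]
      · have cnm' : pvOk out h "name" = false := by simpa using cnm
        rw [pvCands_cons_skip out h t n cid' cnm']
        rw [ih (n + 1) m h1 (Nat.lt_succ_of_lt hn)]
        simp [pvIdLoop, cid]

-- the whole candidate/min pipeline equals A's two scans
theorem pvPipeline_eq (out : String) (t : List (List (String × String))) (n : Nat) :
    (match pvCands out n t with
      | [] => none
      | c :: cs => some ((pvMinCand c cs).2)) =
    (match pvIdLoop out t with
      | some h => some h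
      | none => pvNameLoop out t) := by
  induction t generalizing n with
  | nil => simp [pvCands, pvIdLoop, pvNameLoop]
  | cons h t ih =>
    by_cases cid : pvHitMatch out (pvGet h "id") = true
    · have cid' : pvOk out h "id" = true := by rw [pvOk_eq]; exact cid
      rw [pvCands_cons_id out h t n cid']
      dsimp only
      rw [pvMinCand_rank0 ((0, n), h) _ rfl
        (fun c hc => Nat.lt_of_lt_of_le (Nat.lt_succ_self n) (pvCands_idx_ge out t (n + 1) c hc))]
      simp [pvIdLoop, cid]
    · have cid' : pvOk out h "id" = false := by rw [pvOk_eq]; simpa using cid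
      by_cases cnm : pvHitMatch out (pvGet h "name") = true
      · have cnm' : pvOk out h "name" = true := by rw [pvOk_eq]; exact cnm
        rw [pvCands_cons_name out h t n cid' cnm']
        dsimp only
        rw [pvMinCand_rank1 out t (n + 1) ((1, n), h) rfl (Nat.lt_succ_self n)]
        simp only [pvIdLoop, cid, if_neg, Bool.false_eq_true, not_false_eq_true,
          pvNameLoop, cnm, if_pos]
        cases pvIdLoop out t <;> simp
      · have cnm' : pvOk out h "name" = false := by rw [pvOk_eq]; simpa using cnm
        rw [pvCands_cons_skip out h t n cid' cnm']
        rw [ih (n + 1)]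
        simp [pvIdLoop, pvNameLoop, cid, cnm]

-- ===== VERDICT (by name: the statement is the Claim_ definition above) =====
theorem match_llm_output_to_hit_spec : Claim_equal_match_llm_output_to_hit := by
  intro llm_output hits _
  unfold Spec_match_llm_output_to_hit match_llm_output_to_hit match_llm_output_to_hit_alt
  by_cases hnone : pvNorm llm_output = "none"
  · simp [hnone]
  · simp only [hnone, if_false]
    exact (pvPipeline_eq (pvNorm llm_output) hits 0).symm
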